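-- pv_equiv track=rewrite | github.com/olibyte/hackerRank | algorithms/big_sorting.py | custom_compare
-- ===== SOURCE A (Python) =====
-- def custom_compare(a, b):
--     if len(a) < len(b):
--         return -1
--     if len(a) > len(b):
--         return 1
--     if len(a) < 19:
--         return int(a) - int(b)
--
--     i = 0
--     while True:
--         # length of digits - less than max int
--         a1 = a[i:i+18]
--         b1 = b[i:i+18]
--
--         i += 18
--
--         inta1 = int(a1)
--         intb1 = int(b1)
--
--         if inta1 < intb1:
--             return -1
--         elif inta1 > intb1:
--             return 1
--
--         if len(a1) < 18:
--             return 0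
-- ===== SOURCE B (Python) =====
-- def custom_compare(a, b):
--     if len(a) != len(b):
--         return -1 if len(a) < len(b) else 1
--     if len(a) < 19:
--         return int(a) - int(b)
--     # equal-length digit strings: lexicographic order == numeric order
--     return (a > b) - (a < b)
-- ===== Notes on version B (the rewrite author's own statement) =====
-- stated objective: simpler
-- what changed: The chunk-by-chunk loop that converts 18-digit slices to ints is replaced by a single direct lexicographic string comparison (a>b)-(a<b), valid because for equal-length digit strings lexicographic order equals numeric order; the two length guards and the short-string int(a)-int(b) branch are kept.
-- outside the precondition, e.g. on custom_compare('                +90', '               -100'): A returns 1, B returns -1; on custom_compare('111111111111111111a', '222222222222222222b'): A returns -1, B returns -1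
import Mathlib
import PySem

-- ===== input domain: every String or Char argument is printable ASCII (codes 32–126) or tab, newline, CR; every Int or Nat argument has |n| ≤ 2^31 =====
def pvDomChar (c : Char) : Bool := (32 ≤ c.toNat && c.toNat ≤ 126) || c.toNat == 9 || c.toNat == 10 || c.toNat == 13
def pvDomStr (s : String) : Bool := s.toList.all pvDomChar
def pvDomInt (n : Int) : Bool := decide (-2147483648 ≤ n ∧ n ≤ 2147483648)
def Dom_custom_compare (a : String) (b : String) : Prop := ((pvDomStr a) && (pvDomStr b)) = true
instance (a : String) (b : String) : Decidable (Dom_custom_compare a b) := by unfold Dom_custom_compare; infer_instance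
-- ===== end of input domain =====

-- B replaces A's 18-digit-chunk int-comparison loop by one direct lexicographic string
-- comparison (valid on equal-length digit strings); the length guards and short-string
-- int(a)-int(b) branch are kept. Objective: simpler.


-- ===== PORT A =====
-- int(chunk) ported by hand: exact on the nonempty all-digit chunks reachable inside
-- Pre_custom_compare (on any other chunk Python's int() raises ValueError, which Pre_
-- excludes; here the parse failure is `none` and `.getD 0` is never reached on admitted inputs).
def ccChunkInt? (cs : List Char) : Option Int :=
  if cs ≠ [] ∧ cs.all Char.isDigit then
    some (cs.foldl (fun acc c => acc * 10 + ((c.toNat : Int) - 48)) 0)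
  else none

-- A's `while True` loop over the index i, re-expressed on the remaining suffixes a[i:], b[i:]
def ccLoop (as bs : List Char) : Int :=
  let a1 := as.take 18
  let b1 := bs.take 18
  let inta1 := (ccChunkInt? a1).getD 0
  let intb1 := (ccChunkInt? b1).getD 0
  if inta1 < intb1 then -1
  else if intb1 < inta1 then 1
  else if a1.length < 18 then 0
  else ccLoop (as.drop 18) (bs.drop 18)
termination_by as.length
decreasing_by
  rename_i _ _ h3
  simp only [List.length_drop]
  have h18 : 18 ≤ as.length := by
    have h4 : ¬ (as.take 18).length < 18 := h3
    rw [List.length_take] at h4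
    omega
  omega

def custom_compare (a : String) (b : String) : Int :=
  if PySem.Str.len a < PySem.Str.len b then -1
  else if PySem.Str.len b < PySem.Str.len a then 1
  else if PySem.Str.len a < 19 then (PySem.Int.ofStr? a).getD 0 - (PySem.Int.ofStr? b).getD 0
  else ccLoop a.toList b.toList

-- ===== PORT B =====
def custom_compare_alt (a : String) (b : String) : Int :=
  if PySem.Str.len a ≠ PySem.Str.len b then
    (if PySem.Str.len a < PySem.Str.len b then -1 else 1)
  else if PySem.Str.len a < 19 then (PySem.Int.ofStr? a).getD 0 - (PySem.Int.ofStr? b).getD 0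
  else (if b < a then (1 : Int) else 0) - (if a < b then (1 : Int) else 0)

-- ===== PRECONDITION & SPEC =====
-- Pre_ admits the inputs on which A returns without raising: strings of different lengths
-- (A answers from the lengths alone), equal-length strings shorter than 19 that int() parses
-- (otherwise A raises ValueError), and equal-length digit strings — except equal digit strings
-- of length ≥ 19 divisible by 18, where A slices an empty chunk and int('') raises. Equal-length
-- non-digit strings of length ≥ 19 are excluded although A occasionally returns before hitting a
-- bad chunk: there A's chunk-int verdict is an accident of chunking that B's lexicographic
-- comparison need not match (see claim cites).
def Pre_custom_compare (a : String) (b : String) : Prop :=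
  a.toList.length ≠ b.toList.length
  ∨ (a.toList.length < 19 ∧ (PySem.Int.ofStr? a).isSome = true ∧ (PySem.Int.ofStr? b).isSome = true)
  ∨ (a.toList.all Char.isDigit = true ∧ b.toList.all Char.isDigit = true ∧ a.toList ≠ []
      ∧ ¬(a = b ∧ 19 ≤ a.toList.length ∧ 18 ∣ a.toList.length))
instance (a : String) (b : String) : Decidable (Pre_custom_compare a b) := by
  unfold Pre_custom_compare; infer_instance

def pvWitness_custom_compare : String × String :=
  ("12345678901234567890", "12345678901234567891")

def Spec_custom_compare (a : String) (b : String) (out : Int) : Prop := out = custom_compare_alt a b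
instance (a : String) (b : String) (out : Int) : Decidable (Spec_custom_compare a b out) := by
  unfold Spec_custom_compare; infer_instance

-- ===== CLAIM (what is proved, stated in full; the proofs are below) =====
def Claim_equal_custom_compare : Prop := ∀ (a : String) (b : String), Dom_custom_compare a b → Pre_custom_compare a b → Spec_custom_compare a b (custom_compare a b)

-- ===== LEMMAS AND PROOFS =====

-- numeric value of a digit list (what ccChunkInt? returns on admitted chunks)
def ccVal (cs : List Char) : Int :=
  cs.foldl (fun acc c => acc * 10 + ((c.toNat : Int) - 48)) 0

-- three-valued lexicographic comparison on char lists
def ccCmp3 (xs ys : List Char) : Int :=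
  if List.Lex (· < ·) xs ys then -1 else if List.Lex (· < ·) ys xs then 1 else 0

theorem ccVal_foldl (cs : List Char) : ∀ acc : Int,
    cs.foldl (fun acc c => acc * 10 + ((c.toNat : Int) - 48)) acc
      = acc * 10 ^ cs.length + ccVal cs := by
  induction cs with
  | nil => intro acc; simp [ccVal]
  | cons c cs ih =>
    intro acc
    simp only [List.foldl_cons, List.length_cons, ccVal]
    rw [ih, ih ((0 : Int) * 10 + ((c.toNat : Int) - 48))]
    ring

theorem ccVal_cons (c : Char) (cs : List Char) :
    ccVal (c :: cs) = ((c.toNat : Int) - 48) * 10 ^ cs.length + ccVal cs := by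
  show List.foldl _ ((0 : Int) * 10 + ((c.toNat : Int) - 48)) cs = _
  rw [ccVal_foldl]
  ring

theorem ccVal_bounds (cs : List Char) (h : cs.all Char.isDigit = true) :
    0 ≤ ccVal cs ∧ ccVal cs < 10 ^ cs.length := by
  induction cs with
  | nil => simp [ccVal]
  | cons c cs ih =>
    simp only [List.all_cons, Bool.and_eq_true] at h
    obtain ⟨hc, hcs⟩ := h
    obtain ⟨h0, h1⟩ := ih hcs
    have hd : 48 ≤ c.toNat ∧ c.toNat ≤ 57 := by
      simp [Char.isDigit] at hc
      have h1 := UInt32.le_iff_toNat_le.mp hc.1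
      have h2 := UInt32.le_iff_toNat_le.mp hc.2
      simp at h1 h2
      exact ⟨h1, h2⟩
    rw [ccVal_cons]
    have hp : (0 : Int) < 10 ^ cs.length := by positivity
    have hd0 : (0 : Int) ≤ (c.toNat : Int) - 48 := by omega
    have hd9 : ((c.toNat : Int) - 48) ≤ 9 := by omega
    constructor
    · nlinarith
    · calc ((c.toNat : Int) - 48) * 10 ^ cs.length + ccVal cs
          < ((c.toNat : Int) - 48) * 10 ^ cs.length + 10 ^ cs.length := by linarith
        _ ≤ 9 * 10 ^ cs.length + 10 ^ cs.length := by nlinarith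
        _ = 10 ^ (cs.length + 1) := by ring
        _ = 10 ^ (c :: cs).length := by simp

theorem cc_block_lt (da db x y P : Int) (hP : 0 < P) (hx0 : 0 ≤ x) (hx1 : x < P)
    (hy0 : 0 ≤ y) (hy1 : y < P) :
    da * P + x < db * P + y ↔ da < db ∨ (da = db ∧ x < y) := by
  constructor
  · intro h
    rcases lt_trichotomy da db with hlt | heq | hgt
    · exact Or.inl hlt
    · subst heq; exact Or.inr ⟨rfl, by linarith⟩
    · exfalso
      have h1 : (db + 1) * P ≤ da * P := by nlinarith
      nlinarith
  · rintro (hlt | ⟨rfl, hxy⟩)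
    · have h1 : (da + 1) * P ≤ db * P := by nlinarith
      nlinarith
    · linarith

theorem cc_char_eq_of_toNat (a b : Char) (h : a.toNat = b.toNat) : a = b := by
  have hv : a.val = b.val := (UInt32.toNat_inj (a := a.val) (b := b.val)).mp h
  exact Char.ext hv

theorem ccVal_lt_iff : ∀ (as bs : List Char), as.length = bs.length →
    as.all Char.isDigit = true → bs.all Char.isDigit = true →
    (ccVal as < ccVal bs ↔ List.Lex (· < ·) as bs) := by
  intro as
  induction as with
  | nil =>
    intro bs hlen _ _
    cases bs with
    | nil => simp [ccVal]
    | cons b bs => simp at hlen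
  | cons a as ih =>
    intro bs hlen hda hdb
    cases bs with
    | nil => simp at hlen
    | cons b bs =>
      simp only [List.length_cons, Nat.succ_inj] at hlen
      simp only [List.all_cons, Bool.and_eq_true] at hda hdb
      have htail := ih bs hlen hda.2 hdb.2
      obtain ⟨ta0, ta1⟩ := ccVal_bounds as hda.2
      obtain ⟨tb0, tb1⟩ := ccVal_bounds bs hdb.2
      rw [hlen] at ta1
      rw [ccVal_cons, ccVal_cons, hlen]
      have hp : (0 : Int) < 10 ^ bs.length := by positivity
      have hcons : List.Lex (· < ·) (a :: as) (b :: bs) ↔ a < b ∨ (a = b ∧ List.Lex (· < ·) as bs) := by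
        constructor
        · intro h
          cases h with
          | rel h => exact Or.inl h
          | cons h => exact Or.inr ⟨rfl, h⟩
        · rintro (h | ⟨rfl, h⟩)
          · exact List.Lex.rel h
          · exact List.Lex.cons h
      rw [hcons,
        cc_block_lt ((a.toNat : Int) - 48) ((b.toNat : Int) - 48) (ccVal as) (ccVal bs)
          (10 ^ bs.length) hp ta0 ta1 tb0 tb1]
      have hchar : a < b ↔ (a.toNat : Int) - 48 < (b.toNat : Int) - 48 := by
        rw [Char.lt_def]
        constructor <;> intro h
        · have : a.toNat < b.toNat := h
          omega
        · show a.toNat < b.toNat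
          omega
      have heq : a = b ↔ (a.toNat : Int) - 48 = (b.toNat : Int) - 48 := by
        constructor
        · rintro rfl; rfl
        · intro h
          exact cc_char_eq_of_toNat a b (by omega)
      rw [hchar, heq, htail]

theorem ccVal_inj : ∀ (as bs : List Char), as.length = bs.length →
    as.all Char.isDigit = true → bs.all Char.isDigit = true →
    ccVal as = ccVal bs → as = bs := by
  intro as
  induction as with
  | nil =>
    intro bs hlen _ _ _
    cases bs with
    | nil => rfl
    | cons b bs => simp at hlen
  | cons a as ih =>
    intro bs hlen hda hdb h
    cases bs with
    | nil => simp at hlen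
    | cons b bs =>
      simp only [List.length_cons, Nat.succ_inj] at hlen
      simp only [List.all_cons, Bool.and_eq_true] at hda hdb
      obtain ⟨ta0, ta1⟩ := ccVal_bounds as hda.2
      obtain ⟨tb0, tb1⟩ := ccVal_bounds bs hdb.2
      rw [hlen] at ta1
      rw [ccVal_cons, ccVal_cons, hlen] at h
      have hp : (0 : Int) < 10 ^ bs.length := by positivity
      have hdd : (a.toNat : Int) - 48 = (b.toNat : Int) - 48 := by
        rcases lt_trichotomy ((a.toNat : Int) - 48) ((b.toNat : Int) - 48) with hlt | heq | hgt
        · exfalso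
          have h1 : ((a.toNat : Int) - 48 + 1) * 10 ^ bs.length ≤ ((b.toNat : Int) - 48) * 10 ^ bs.length := by
            nlinarith
          nlinarith
        · exact heq
        · exfalso
          have h1 : ((b.toNat : Int) - 48 + 1) * 10 ^ bs.length ≤ ((a.toNat : Int) - 48) * 10 ^ bs.length := by
            nlinarith
          nlinarith
      have hab : a = b := cc_char_eq_of_toNat a b (by omega)
      subst hab
      have htl : ccVal as = ccVal bs := by linarith
      rw [ih bs hlen hda.2 hdb.2 htl]

theorem lex_append_of_length_eq {as bs : List Char} (xs ys : List Char)
    (h : List.Lex (· < ·) as bs) (hlen : as.length = bs.length) :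
    List.Lex (· < ·) (as ++ xs) (bs ++ ys) := by
  induction h with
  | nil => simp at hlen
  | rel h => exact List.Lex.rel h
  | @cons a l₁ l₂ h ih =>
    exact List.Lex.cons (ih (by simpa using hlen))

theorem ccCmp3_append_left (p xs ys : List Char) :
    ccCmp3 (p ++ xs) (p ++ ys) = ccCmp3 xs ys := by
  have h : ∀ u v : List Char, List.Lex (· < ·) (p ++ u) (p ++ v) ↔ List.Lex (· < ·) u v := by
    intro u v
    induction p with
    | nil => simp
    | cons c p ih => simpa [List.lex_cons_iff] using ih
  simp only [ccCmp3, h]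

theorem cc_all_take (l : List Char) (p : Char → Bool) (h : l.all p = true) (n : Nat) :
    (l.take n).all p = true := by
  rw [List.all_eq_true] at *
  intro x hx; exact h x (List.mem_of_mem_take hx)

theorem cc_all_drop (l : List Char) (p : Char → Bool) (h : l.all p = true) (n : Nat) :
    (l.drop n).all p = true := by
  rw [List.all_eq_true] at *
  intro x hx; exact h x (List.mem_of_mem_drop hx)

theorem ccCmp3_self (xs : List Char) : ccCmp3 xs xs = 0 := by
  have h : ¬ List.Lex (· < ·) xs xs := by
    intro h
    exact lt_irrefl xs (show xs < xs from h)
  simp [ccCmp3, h]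

theorem ccLoop_eq_ccCmp3 : ∀ (n : Nat) (as bs : List Char), as.length ≤ n →
    as.length = bs.length →
    as.all Char.isDigit = true → bs.all Char.isDigit = true →
    (as = bs → ¬ (18 ∣ as.length)) →
    ccLoop as bs = ccCmp3 as bs := by
  intro n
  induction n with
  | zero =>
    intro as bs hle hlen hda hdb hex
    have ha : as = [] := List.eq_nil_of_length_eq_zero (by omega)
    have hb : bs = [] := List.eq_nil_of_length_eq_zero (by omega)
    exact absurd (dvd_zero 18) (by simpa [ha, hb] using hex (by rw [ha, hb]))
  | succ n ih =>
    intro as bs hle hlen hda hdb hex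
    by_cases hanil : as = []
    · have hb : bs = [] := List.eq_nil_of_length_eq_zero (by rw [← hlen, hanil]; rfl)
      exact absurd (dvd_zero 18) (by simpa [hanil, hb] using hex (by rw [hanil, hb]))
    · have hbnil : bs ≠ [] := by
        intro h; apply hanil
        exact List.eq_nil_of_length_eq_zero (by rw [hlen, h]; rfl)
      have hta : (as.take 18).all Char.isDigit = true := cc_all_take as _ hda 18
      have htb : (bs.take 18).all Char.isDigit = true := cc_all_take bs _ hdb 18
      have htane : as.take 18 ≠ [] := by
        simp [List.take_eq_nil_iff, hanil]
      have htbne : bs.take 18 ≠ [] := by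
        simp [List.take_eq_nil_iff, hbnil]
      have hca : ccChunkInt? (as.take 18) = some (ccVal (as.take 18)) := by
        rw [ccChunkInt?, if_pos ⟨htane, hta⟩]; rfl
      have hcb : ccChunkInt? (bs.take 18) = some (ccVal (bs.take 18)) := by
        rw [ccChunkInt?, if_pos ⟨htbne, htb⟩]; rfl
      have hlent : (as.take 18).length = (bs.take 18).length := by
        simp [List.length_take, hlen]
      rw [ccLoop.eq_def]
      dsimp only
      simp only [hca, hcb, Option.getD_some]
      rcases lt_trichotomy (ccVal (as.take 18)) (ccVal (bs.take 18)) with hlt | heq | hgt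
      · rw [if_pos hlt]
        have hLex : List.Lex (· < ·) (as.take 18) (bs.take 18) :=
          (ccVal_lt_iff _ _ hlent hta htb).mp hlt
        have hLexAB : List.Lex (· < ·) as bs := by
          have := lex_append_of_length_eq (as.drop 18) (bs.drop 18) hLex hlent
          rwa [List.take_append_drop, List.take_append_drop] at this
        rw [ccCmp3, if_pos hLexAB]
      · rw [if_neg (by omega), if_neg (by omega)]
        have hchunk : as.take 18 = bs.take 18 := ccVal_inj _ _ hlent hta htb heq
        by_cases hshort : (as.take 18).length < 18
        · rw [if_pos hshort]
          have hlena : as.length < 18 := by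
            simp only [List.length_take] at hshort; omega
          have haeq : as.take 18 = as := List.take_of_length_le (by omega)
          have hbeq : bs.take 18 = bs := List.take_of_length_le (by omega)
          have : as = bs := by rw [← haeq, ← hbeq, hchunk]
          rw [this, ccCmp3_self]
        · rw [if_neg hshort]
          simp only [List.length_take, not_lt] at hshort
          have hlen18 : 18 ≤ as.length := by omega
          have hstep : ccLoop (as.drop 18) (bs.drop 18) = ccCmp3 (as.drop 18) (bs.drop 18) := by
            apply ih
            · simp only [List.length_drop]; omega
            · simp only [List.length_drop]; omega
            · exact cc_all_drop as _ hda 18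
            · exact cc_all_drop bs _ hdb 18
            · intro hdd
              have habeq : as = bs := by
                have h1 := List.take_append_drop 18 as
                have h2 := List.take_append_drop 18 bs
                rw [← h1, ← h2, hchunk, hdd]
              have h3 := hex habeq
              simp only [List.length_drop]
              intro hdvd
              apply h3
              have : as.length = 18 + (as.length - 18) := by omega
              rw [this]
              exact Dvd.dvd.add (dvd_refl 18) hdvd
          rw [hstep]
          have h1 := List.take_append_drop 18 as
          have h2 := List.take_append_drop 18 bs
          calc ccCmp3 (as.drop 18) (bs.drop 18)
              = ccCmp3 (as.take 18 ++ as.drop 18) (as.take 18 ++ bs.drop 18) :=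
                (ccCmp3_append_left _ _ _).symm
            _ = ccCmp3 as bs := by rw [(by rw [hchunk] : as.take 18 ++ bs.drop 18 = bs.take 18 ++ bs.drop 18), h1, h2]
      · rw [if_neg (by omega), if_pos hgt]
        have hLex : List.Lex (· < ·) (bs.take 18) (as.take 18) :=
          (ccVal_lt_iff _ _ hlent.symm htb hta).mp hgt
        have hLexBA : List.Lex (· < ·) bs as := by
          have := lex_append_of_length_eq (bs.drop 18) (as.drop 18) hLex hlent.symm
          rwa [List.take_append_drop, List.take_append_drop] at this
        have hnab : ¬ List.Lex (· < ·) as bs := by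
          intro h
          exact lt_asymm (show bs < as from hLexBA) (show as < bs from h)
        rw [ccCmp3, if_neg hnab, if_pos hLexBA]

theorem string_cmp_eq_ccCmp3 (a b : String) :
    ((if b < a then (1 : Int) else 0) - (if a < b then (1 : Int) else 0)) = ccCmp3 a.toList b.toList := by
  have hab : a < b ↔ List.Lex (· < ·) a.toList b.toList := String.lt_iff_toList_lt
  have hba : b < a ↔ List.Lex (· < ·) b.toList a.toList := String.lt_iff_toList_lt
  rcases lt_trichotomy a b with h | h | h
  · have h1 : ¬ b < a := lt_asymm h
    rw [if_neg h1, if_pos h, ccCmp3, if_pos (hab.mp h)]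
    norm_num
  · subst h
    have hx : ¬ a < a := lt_irrefl a
    have hl : ¬ List.Lex (· < ·) a.toList a.toList := fun hl => hx (hab.mpr hl)
    rw [if_neg hx, ccCmp3, if_neg hl]
    norm_num
  · have h1 : ¬ a < b := lt_asymm h
    rw [if_pos h, if_neg h1, ccCmp3, if_neg (fun hl => h1 (hab.mpr hl)), if_pos (hba.mp h)]
    norm_num

-- ===== VERDICT (by name: the statement is the Claim_ definition above) =====
theorem custom_compare_spec : Claim_equal_custom_compare := by
  intro a b _hdom hpre
  unfold Spec_custom_compare custom_compare custom_compare_alt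
  rw [PySem.Str.len_eq, PySem.Str.len_eq]
  by_cases h1 : (a.toList.length : Int) < (b.toList.length : Int)
  · rw [if_pos h1, if_pos (by omega : (a.toList.length : Int) ≠ (b.toList.length : Int)), if_pos h1]
  · rw [if_neg h1]
    by_cases h2 : (b.toList.length : Int) < (a.toList.length : Int)
    · rw [if_pos h2, if_pos (by omega : (a.toList.length : Int) ≠ (b.toList.length : Int)),
        if_neg (by omega : ¬ (a.toList.length : Int) < (b.toList.length : Int))]
    · rw [if_neg h2, if_neg (by omega : ¬ (a.toList.length : Int) ≠ (b.toList.length : Int))]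
      have hleneq : a.toList.length = b.toList.length := by omega
      by_cases h3 : (a.toList.length : Int) < 19
      · rw [if_pos h3, if_pos h3]
      · rw [if_neg h3, if_neg h3]
        have hlong : 19 ≤ a.toList.length := by omega
        rcases hpre with hp | hp | hp
        · exact absurd hleneq hp
        · omega
        · obtain ⟨hda, hdb, hane, hnx⟩ := hp
          rw [string_cmp_eq_ccCmp3]
          apply ccLoop_eq_ccCmp3 a.toList.length _ _ le_rfl hleneq hda hdb
          intro heq hdvd
          apply hnx
          refine ⟨?_, hlong, hdvd⟩
          exact String.toList_inj.mp heq
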